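-- pv_equiv track=rewrite | github.com/brianmkimmel/AOC2021 | 3/day3.py | count_columns
-- ===== SOURCE A (Python) =====
-- def count_columns(data: list) -> dict:
--   columns = {}
--   for row in data:
--     x = 0
--     for c in row:
--       if x not in columns:
--         columns[x] = {"1": 0, "0": 0}
--       if c == "1":
--         columns[x]["1"] += 1
--       else:
--         columns[x]["0"] += 1
--       x += 1
--   return columns
-- ===== SOURCE B (Python) =====
-- def count_columns(data: list) -> dict:
--   maxlen = 0
--   for row in data:
--     maxlen = max(maxlen, len(row))
--   columns = {}
--   for x in range(maxlen):
--     n = sum(1 for row in data if len(row) > x)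
--     ones = sum(1 for row in data if len(row) > x and row[x] == "1")
--     columns[x] = {"1": ones, "0": n - ones}
--   return columns
-- ===== Notes on version B (the rewrite author's own statement) =====
-- stated objective: alternative
-- what changed: B first computes the maximum row length, then builds the result column-major: for each column index it scans the rows counting ones and eligible rows, instead of A's row-major pass that lazily allocates and mutates per-column sub-dicts.
import Mathlib
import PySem

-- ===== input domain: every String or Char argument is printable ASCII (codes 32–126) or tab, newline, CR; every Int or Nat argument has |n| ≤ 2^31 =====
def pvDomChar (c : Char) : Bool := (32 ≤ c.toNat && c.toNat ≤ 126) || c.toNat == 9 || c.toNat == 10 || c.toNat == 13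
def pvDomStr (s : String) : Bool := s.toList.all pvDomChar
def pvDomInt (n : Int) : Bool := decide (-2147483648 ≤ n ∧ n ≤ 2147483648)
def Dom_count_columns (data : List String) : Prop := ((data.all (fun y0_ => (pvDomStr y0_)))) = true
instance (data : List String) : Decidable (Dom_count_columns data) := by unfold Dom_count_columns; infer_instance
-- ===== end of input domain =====

-- B builds the table column-major (max row length first, then per-column counts over the rows) instead of A's row-major pass with lazily allocated, mutated sub-dicts; same cost, different traversal.


-- ===== PORT A =====
-- the body of A's inner loop over the characters of a row (state: the dict and the column index x)
def countColsStep (st : PySem.Dict Int (PySem.Dict String Int) × Int) (c : Char) :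
    PySem.Dict Int (PySem.Dict String Int) × Int :=
  let columns := st.1
  let x := st.2
  let columns := if !(columns.contains x) then columns.insert x (PySem.Dict.mk [("1", 0), ("0", 0)]) else columns
  let columns := if c == '1'
    then columns.modify x PySem.Dict.empty (fun d => d.modify "1" 0 (· + 1))
    else columns.modify x PySem.Dict.empty (fun d => d.modify "0" 0 (· + 1))
  (columns, x + 1)

def count_columns (data : List String) : List (Int × List (String × Int)) :=
  let columns : PySem.Dict Int (PySem.Dict String Int) :=
    data.foldl (fun columns row => (row.toList.foldl countColsStep (columns, 0)).1) PySem.Dict.empty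
  columns.items.map (fun p => (p.1, p.2.items))

-- ===== PORT B =====
def count_columns_alt (data : List String) : List (Int × List (String × Int)) :=
  let maxlen : Nat := data.foldl (fun acc row => max acc row.toList.length) 0
  (List.range maxlen).map (fun (x : Nat) =>
    let n : Int := (data.countP (fun row => decide (x < row.toList.length)) : Int)
    let ones : Int := (data.countP (fun row => decide (x < row.toList.length) && (row.toList[x]? == some '1')) : Int)
    ((x : Int), [("1", ones), ("0", n - ones)]))

-- ===== PRECONDITION & SPEC =====
def Spec_count_columns (data : List String) (out : List (Int × List (String × Int))) : Prop := out = count_columns_alt data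
instance (data : List String) (out : List (Int × List (String × Int))) : Decidable (Spec_count_columns data out) := by unfold Spec_count_columns; infer_instance

-- ===== CLAIM (what is proved, stated in full; the proofs are below) =====
def Claim_equal_count_columns : Prop := ∀ (data : List String), Dom_count_columns data → Spec_count_columns data (count_columns data)

-- ===== LEMMAS AND PROOFS =====

-- counts of '1'/non-'1' chars in column x over the finished rows, and the running max length
def onesAt (data : List String) (x : Nat) : Nat :=
  data.countP (fun row => row.toList[x]? == some '1')
def zerosAt (data : List String) (x : Nat) : Nat :=
  data.countP (fun row => decide (x < row.toList.length) && !(row.toList[x]? == some '1'))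
def mlen (data : List String) : Nat := data.foldl (fun acc row => max acc row.toList.length) 0

-- a dict whose keys are 0..M-1 in order
def rdict (M : Nat) (g : Nat → PySem.Dict String Int) : PySem.Dict Int (PySem.Dict String Int) :=
  PySem.Dict.mk ((List.range M).map (fun (x : Nat) => ((x : Int), g x)))

-- the per-column sub-dict A has built after the finished rows `data` plus the first |pre| chars of the current row
def innerD (data : List String) (pre : List Char) (x : Nat) : PySem.Dict String Int :=
  PySem.Dict.mk
    [("1", (onesAt data x : Int) + (if pre[x]? == some '1' then 1 else 0)),
     ("0", (zerosAt data x : Int) + (if decide (x < pre.length) && !(pre[x]? == some '1') then 1 else 0))]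

def pdict (data : List String) (pre : List Char) : PySem.Dict Int (PySem.Dict String Int) :=
  rdict (max (mlen data) pre.length) (innerD data pre)

theorem find?_range (M k : Nat) (hk : k < M) :
    List.find? (fun x => x == k) (List.range M) = some k := by
  induction M with
  | zero => omega
  | succ M ih =>
    rw [List.range_succ, List.find?_append]
    by_cases h : k < M
    · rw [ih h]; rfl
    · have hk' : k = M := by omega
      subst hk'
      have hn : List.find? (fun x => x == k) (List.range k) = none := by
        rw [List.find?_eq_none]
        intro x hx; simp at hx ⊢; omega
      simp [hn]

theorem contains_rdict (M : Nat) (g : Nat → PySem.Dict String Int) (k : Nat) :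
    (rdict M g).contains ((k : Nat) : Int) = decide (k < M) := by
  by_cases h : k < M
  · simp only [h, decide_true, rdict, PySem.Dict.contains, List.any_map, List.any_eq_true]
    exact ⟨k, by simp [List.mem_range, h]⟩
  · simp only [h, decide_false, rdict, PySem.Dict.contains, List.any_map, List.any_eq_false]
    intro x hx
    simp at hx ⊢
    omega

theorem get?_rdict (M : Nat) (g : Nat → PySem.Dict String Int) (k : Nat) (hk : k < M) :
    (rdict M g).get? ((k : Nat) : Int) = some (g k) := by
  have hf : List.find? (fun p => p.1 == ((k : Nat) : Int)) ((List.range M).map (fun (x : Nat) => ((x : Int), g x)))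
      = some ((k : Int), g k) := by
    rw [List.find?_map]
    have hp : ((fun p => p.1 == ((k : Nat) : Int)) ∘ (fun (x : Nat) => ((x : Int), g x))) = (fun (x : Nat) => x == k) := by
      funext x; simp
    rw [hp, find?_range M k hk]
    rfl
  simp [rdict, PySem.Dict.get?, hf]

theorem insert_rdict_lt (M : Nat) (g : Nat → PySem.Dict String Int) (k : Nat) (hk : k < M) (v : PySem.Dict String Int) :
    (rdict M g).insert ((k : Nat) : Int) v = rdict M (fun x => if x = k then v else g x) := by
  have hc : (rdict M g).contains ((k : Nat) : Int) = true := by rw [contains_rdict]; simpa using hk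
  unfold rdict at hc ⊢
  simp only [PySem.Dict.insert, hc, if_true, List.map_map]
  congr 1
  apply List.map_congr_left
  intro x hx
  by_cases hxk : x = k
  · subst hxk; simp
  · simp [Function.comp, hxk]

theorem insert_rdict_self (M : Nat) (g : Nat → PySem.Dict String Int) (v : PySem.Dict String Int) :
    (rdict M g).insert ((M : Nat) : Int) v = rdict (M + 1) (fun x => if x = M then v else g x) := by
  have hc : (rdict M g).contains ((M : Nat) : Int) = false := by rw [contains_rdict]; simp
  unfold rdict at hc ⊢
  simp only [List.range_succ, List.map_append]
  simp only [PySem.Dict.insert, hc, Bool.false_eq_true, if_false]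
  congr 2
  · apply List.map_congr_left
    intro x hx
    simp at hx
    simp [Nat.ne_of_lt hx]
  · simp

theorem modify_rdict_lt (M : Nat) (g : Nat → PySem.Dict String Int) (k : Nat) (hk : k < M)
    (dflt : PySem.Dict String Int) (f : PySem.Dict String Int → PySem.Dict String Int) :
    (rdict M g).modify ((k : Nat) : Int) dflt f = rdict M (fun x => if x = k then f (g k) else g x) := by
  simp only [PySem.Dict.modify, PySem.Dict.getD, get?_rdict M g k hk, Option.getD_some]
  exact insert_rdict_lt M g k hk (f (g k))

theorem rdict_congr (M : Nat) (g g' : Nat → PySem.Dict String Int) (h : ∀ x, x < M → g x = g' x) :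
    rdict M g = rdict M g' := by
  unfold rdict
  congr 1
  apply List.map_congr_left
  intro x hx
  simp at hx
  rw [h x hx]

theorem modify_pair_one (a b : Int) :
    (PySem.Dict.mk [("1", a), ("0", b)]).modify "1" 0 (· + 1) = PySem.Dict.mk [("1", a + 1), ("0", b)] := by
  simp [PySem.Dict.modify, PySem.Dict.insert, PySem.Dict.getD, PySem.Dict.get?, PySem.Dict.contains]

theorem modify_pair_zero (a b : Int) :
    (PySem.Dict.mk [("1", a), ("0", b)]).modify "0" 0 (· + 1) = PySem.Dict.mk [("1", a), ("0", b + 1)] := by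
  simp [PySem.Dict.modify, PySem.Dict.insert, PySem.Dict.getD, PySem.Dict.get?, PySem.Dict.contains]

theorem getElem?_append_single_ne (pre : List Char) (c : Char) (x : Nat) (hx : x ≠ pre.length) :
    (pre ++ [c])[x]? = pre[x]? := by
  by_cases h : x < pre.length
  · exact List.getElem?_append_left h
  · have hl : (pre ++ [c]).length = pre.length + 1 := by simp
    rw [List.getElem?_eq_none (show (pre ++ [c]).length ≤ x by rw [hl]; omega),
      List.getElem?_eq_none (by omega)]

theorem mlen_bound (data : List String) : ∀ r ∈ data, r.toList.length ≤ mlen data := by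
  intro r hr
  exact (PySem.List.le_foldl_max_nat data (fun r => r.toList.length) 0).2 r hr

theorem innerD_snoc_ne (data : List String) (pre : List Char) (c : Char) (x : Nat) (hxk : x ≠ pre.length) :
    innerD data (pre ++ [c]) x = innerD data pre x := by
  unfold innerD
  rw [getElem?_append_single_ne pre c x hxk]
  have hiff : (x < (pre ++ [c]).length) ↔ (x < pre.length) := by
    simp only [List.length_append, List.length_cons, List.length_nil]
    omega
  rw [decide_eq_decide.mpr hiff]

theorem innerD_self (data : List String) (pre : List Char) :
    innerD data pre pre.length
      = PySem.Dict.mk [("1", (onesAt data pre.length : Int)), ("0", (zerosAt data pre.length : Int))] := by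
  unfold innerD
  rw [List.getElem?_eq_none le_rfl]
  simp

theorem innerD_snoc_self_one (data : List String) (pre : List Char) :
    innerD data (pre ++ ['1']) pre.length
      = PySem.Dict.mk [("1", (onesAt data pre.length : Int) + 1), ("0", (zerosAt data pre.length : Int))] := by
  unfold innerD
  rw [List.getElem?_concat_length]
  simp

theorem innerD_snoc_self_ne (data : List String) (pre : List Char) (c : Char) (hc : c ≠ '1') :
    innerD data (pre ++ [c]) pre.length
      = PySem.Dict.mk [("1", (onesAt data pre.length : Int)), ("0", (zerosAt data pre.length : Int) + 1)] := by
  unfold innerD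
  rw [List.getElem?_concat_length]
  have hne : (some c == some '1') = false := by simpa using hc
  simp [hne]

theorem step_pdict (data : List String) (pre : List Char) (c : Char) :
    countColsStep (pdict data pre, ((pre.length : Nat) : Int)) c
      = (pdict data (pre ++ [c]), ((pre.length : Int) + 1)) := by
  have hbound := mlen_bound data
  have hlen' : (pre ++ [c]).length = pre.length + 1 := by simp
  by_cases hk : pre.length < mlen data
  · -- the column already exists: no insertion, modify its sub-dict in place
    have hM : max (mlen data) pre.length = mlen data := by omega
    have hM' : max (mlen data) (pre.length + 1) = mlen data := by omega
    have hc1 : (rdict (mlen data) (innerD data pre)).contains ((pre.length : Nat) : Int) = true := by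
      rw [contains_rdict]; simpa using hk
    by_cases hc : c = '1'
    · subst hc
      simp only [countColsStep, pdict, hM, hlen', hM', hc1, Bool.not_true, Bool.false_eq_true,
        if_false, beq_self_eq_true, if_true]
      rw [modify_rdict_lt (mlen data) (innerD data pre) pre.length hk]
      refine Prod.ext ?_ rfl
      apply rdict_congr
      intro x hx
      by_cases hxk : x = pre.length
      · subst hxk
        rw [if_pos rfl, innerD_self, modify_pair_one, innerD_snoc_self_one]
      · rw [if_neg hxk, innerD_snoc_ne data pre '1' x hxk]
    · have hcb : (c == '1') = false := by simpa using hc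
      simp only [countColsStep, pdict, hM, hlen', hM', hc1, Bool.not_true, Bool.false_eq_true,
        if_false, hcb]
      rw [modify_rdict_lt (mlen data) (innerD data pre) pre.length hk]
      refine Prod.ext ?_ rfl
      apply rdict_congr
      intro x hx
      by_cases hxk : x = pre.length
      · subst hxk
        rw [if_pos rfl, innerD_self, modify_pair_zero, innerD_snoc_self_ne data pre c hc]
      · rw [if_neg hxk, innerD_snoc_ne data pre c x hxk]
  · -- new column: append the fresh sub-dict, then modify it
    have hmle : mlen data ≤ pre.length := by omega
    have hM : max (mlen data) pre.length = pre.length := by omega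
    have hM' : max (mlen data) (pre.length + 1) = pre.length + 1 := by omega
    have hc1 : (rdict pre.length (innerD data pre)).contains ((pre.length : Nat) : Int) = false := by
      rw [contains_rdict]; simp
    have hone0 : onesAt data pre.length = 0 := by
      refine List.countP_eq_zero.mpr (fun r hr => ?_)
      have h := hbound r hr
      rw [List.getElem?_eq_none (by omega)]
      simp
    have hzero0 : zerosAt data pre.length = 0 := by
      refine List.countP_eq_zero.mpr (fun r hr => ?_)
      have h := hbound r hr
      simp only [Bool.and_eq_true, decide_eq_true_eq]
      rintro ⟨h1, -⟩
      omega
    by_cases hc : c = '1'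
    · subst hc
      simp only [countColsStep, pdict, hM, hlen', hM', hc1, Bool.not_false, if_true,
        beq_self_eq_true]
      rw [insert_rdict_self pre.length (innerD data pre) (PySem.Dict.mk [("1", 0), ("0", 0)])]
      rw [modify_rdict_lt (pre.length + 1) _ pre.length (by omega)]
      refine Prod.ext ?_ rfl
      apply rdict_congr
      intro x hx
      by_cases hxk : x = pre.length
      · subst hxk
        rw [if_pos rfl, if_pos rfl, modify_pair_one, innerD_snoc_self_one, hone0, hzero0]
        norm_num
      · rw [if_neg hxk, if_neg hxk, innerD_snoc_ne data pre '1' x hxk]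
    · have hcb : (c == '1') = false := by simpa using hc
      simp only [countColsStep, pdict, hM, hlen', hM', hc1, Bool.not_false, if_true, hcb,
        Bool.false_eq_true, if_false]
      rw [insert_rdict_self pre.length (innerD data pre) (PySem.Dict.mk [("1", 0), ("0", 0)])]
      rw [modify_rdict_lt (pre.length + 1) _ pre.length (by omega)]
      refine Prod.ext ?_ rfl
      apply rdict_congr
      intro x hx
      by_cases hxk : x = pre.length
      · subst hxk
        rw [if_pos rfl, if_pos rfl, modify_pair_zero, innerD_snoc_self_ne data pre c hc, hone0, hzero0]
        norm_num
      · rw [if_neg hxk, if_neg hxk, innerD_snoc_ne data pre c x hxk]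

theorem inner_pdict (data : List String) (cs pre : List Char) :
    cs.foldl countColsStep (pdict data pre, ((pre.length : Nat) : Int))
      = (pdict data (pre ++ cs), (((pre.length + cs.length : Nat)) : Int)) := by
  induction cs generalizing pre with
  | nil => simp
  | cons c cs ih =>
      rw [List.foldl_cons, step_pdict data pre c]
      have h2 : ((pre.length : Int) + 1) = (((pre ++ [c]).length : Nat) : Int) := by simp
      rw [h2, ih (pre ++ [c])]
      rw [show (pre ++ [c]) ++ cs = pre ++ (c :: cs) by simp]
      have : (pre ++ [c]).length + cs.length = pre.length + (c :: cs).length := by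
        simp only [List.length_append, List.length_cons, List.length_nil]
        omega
      rw [this]

theorem row_pdict (data : List String) (row : String) :
    pdict data row.toList = pdict (data ++ [row]) [] := by
  have hM : max (mlen (data ++ [row])) ([] : List Char).length = max (mlen data) row.toList.length := by
    simp [mlen, List.foldl_append]
  unfold pdict
  rw [hM]
  apply rdict_congr
  intro x hx
  unfold innerD
  have h1 : (onesAt (data ++ [row]) x : Int)
      = (onesAt data x : Int) + (if row.toList[x]? == some '1' then 1 else 0) := by
    simp only [onesAt, List.countP_append, List.countP_cons, List.countP_nil, Nat.zero_add]
    split_ifs <;> push_cast <;> omega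
  have h0 : (zerosAt (data ++ [row]) x : Int)
      = (zerosAt data x : Int) + (if decide (x < row.toList.length) && !(row.toList[x]? == some '1') then 1 else 0) := by
    simp only [zerosAt, List.countP_append, List.countP_cons, List.countP_nil, Nat.zero_add]
    split_ifs <;> push_cast <;> omega
  simp [h1, h0]

theorem foldA (data : List String) :
    data.foldl (fun columns row => (row.toList.foldl countColsStep (columns, 0)).1) PySem.Dict.empty
      = pdict data [] := by
  induction data using List.reverseRecOn with
  | nil => simp [pdict, rdict, mlen, PySem.Dict.empty]
  | append_singleton data row ih =>
      rw [List.foldl_append, ih]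
      simp only [List.foldl_cons, List.foldl_nil]
      have h0 : (0 : Int) = ((List.length ([] : List Char) : Nat) : Int) := by simp
      rw [h0, inner_pdict data row.toList []]
      simp [row_pdict]

theorem countP_split (data : List String) (x : Nat) :
    data.countP (fun row => decide (x < row.toList.length)) = onesAt data x + zerosAt data x := by
  induction data with
  | nil => simp [onesAt, zerosAt]
  | cons r data ih =>
      simp only [onesAt, zerosAt, List.countP_cons] at ih ⊢
      rw [ih]
      by_cases h1 : r.toList[x]? = some '1'
      · obtain ⟨hx, -⟩ := List.getElem?_eq_some_iff.mp h1
        have hx2 : x < r.length := by simpa using hx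
        rw [if_pos (by simp [hx2]), if_pos (by simp [h1]), if_neg (by simp [h1])]
        omega
      · by_cases hx : x < r.toList.length
        · have hx2 : x < r.length := by simpa using hx
          have h1' : ¬ r.toList[x] = '1' := fun he =>
            h1 (by rw [List.getElem?_eq_getElem hx]; exact congrArg some he)
          rw [if_pos (by simp [hx2]), if_neg (by simp [h1]), if_pos (by simp [hx2]; exact h1')]
          omega
        · have hx2 : ¬ x < r.length := by simpa using hx
          rw [if_neg (by simp [hx2]), if_neg (by simp [h1]), if_neg (by simp [hx2])]
          omega

theorem onesAt_eq (data : List String) (x : Nat) :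
    data.countP (fun row => decide (x < row.toList.length) && (row.toList[x]? == some '1')) = onesAt data x := by
  unfold onesAt
  apply List.countP_congr
  intro r hr
  by_cases h1 : r.toList[x]? = some '1'
  · obtain ⟨hx, -⟩ := List.getElem?_eq_some_iff.mp h1
    have hx2 : x < r.length := by simpa using hx
    simp [hx2]
  · simp [h1]

-- ===== VERDICT (by name: the statement is the Claim_ definition above) =====
theorem count_columns_spec : Claim_equal_count_columns := by
  intro data _
  show count_columns data = count_columns_alt data
  unfold count_columns count_columns_alt
  rw [foldA]
  simp only [pdict, rdict, innerD, List.map_map, List.length_nil, Nat.max_zero]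
  show _ = (List.range (mlen data)).map _
  apply List.map_congr_left
  intro x hx
  simp only [Function.comp]
  rw [onesAt_eq]
  have hs := countP_split data x
  have : ((data.countP (fun row => decide (x < row.toList.length)) : Nat) : Int) - (onesAt data x : Int)
      = (zerosAt data x : Int) := by rw [hs]; push_cast; ring
  simp [this.symm]
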